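-- pv_equiv track=rewrite | github.com/Robot-Will/Stino | libs/base_utils/c_file.py | simplify_to_one_line
-- ===== SOURCE A (Python) =====
-- def simplify_to_one_line(lines):
--     """Doc."""
--     new_lines = []
--     new_line = ''
--     is_line_end = False
--     for line in lines:
--         new_line += line
--         if line.startswith('#') or line.endswith(';') or line.endswith('}'):
--             is_line_end = True
--         if is_line_end:
--             new_lines.append(new_line)
--             new_line = ''
--             is_line_end = False
--     if not is_line_end:
--         new_lines.append(new_line)
--     return new_lines
-- ===== SOURCE B (Python) =====
-- def simplify_to_one_line(lines):
--     """Doc."""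
--     # Single right-to-left pass, building the result back-to-front: the lines of
--     # the statement still open are collected (in reverse) and joined when a
--     # terminator line closes it.
--     head_parts = []
--     rest_rev = []
--     for line in reversed(lines):
--         if line.startswith('#') or line.endswith(';') or line.endswith('}'):
--             rest_rev.append(''.join(reversed(head_parts)))
--             head_parts = [line]
--         else:
--             head_parts.append(line)
--     return [''.join(reversed(head_parts))] + rest_rev[::-1]
-- ===== Notes on version B (the rewrite author's own statement) =====
-- stated objective: alternative
-- what changed: B builds the result back-to-front in one reversed pass (growing the currently open statement at its head, closing it when a terminator line is met), instead of A's forward flush loop with an is_line_end flag and an always-final append.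
import Mathlib
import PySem

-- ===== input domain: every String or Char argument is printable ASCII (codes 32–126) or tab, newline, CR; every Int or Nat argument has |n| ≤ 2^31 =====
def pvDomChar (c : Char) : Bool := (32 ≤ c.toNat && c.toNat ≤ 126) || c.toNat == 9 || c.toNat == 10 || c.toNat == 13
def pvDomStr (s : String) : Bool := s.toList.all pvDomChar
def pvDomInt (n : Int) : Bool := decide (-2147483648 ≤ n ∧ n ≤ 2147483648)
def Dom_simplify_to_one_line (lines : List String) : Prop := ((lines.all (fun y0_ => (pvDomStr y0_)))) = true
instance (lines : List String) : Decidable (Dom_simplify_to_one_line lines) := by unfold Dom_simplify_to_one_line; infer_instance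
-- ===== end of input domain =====

-- B rebuilds the result back-to-front in one reversed pass; return values proved equal to A's on all inputs.

-- shared line predicate: line.startswith('#') or line.endswith(';') or line.endswith('}')
def pvLineEnd (line : String) : Bool :=
  PySem.Str.startswith line "#" || PySem.Str.endswith line ";" || PySem.Str.endswith line "}"

-- ===== PORT A =====
-- loop body of A: state (new_lines, new_line, is_line_end)
def pvStepA (st : List String × String × Bool) (line : String) : List String × String × Bool :=
  let new_line := st.2.1 ++ line
  let is_line_end := if pvLineEnd line then true else st.2.2
  if is_line_end then (st.1 ++ [new_line], "", false)
  else (st.1, new_line, is_line_end)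

def simplify_to_one_line (lines : List String) : List String :=
  let r := lines.foldl pvStepA ([], "", false)
  if !r.2.2 then r.1 ++ [r.2.1] else r.1

-- ===== PORT B =====
-- loop body of B: state (head_parts, rest_rev); B folds over reversed(lines)
def pvStepB (st : List String × List String) (line : String) : List String × List String :=
  if pvLineEnd line then ([line], st.2 ++ [PySem.Str.join "" st.1.reverse])
  else (st.1 ++ [line], st.2)

def simplify_to_one_line_alt (lines : List String) : List String :=
  let st := lines.reverse.foldl pvStepB ([], [])
  PySem.Str.join "" st.1.reverse :: st.2.reverse

-- ===== PRECONDITION & SPEC =====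
def Spec_simplify_to_one_line (lines : List String) (out : List String) : Prop := out = simplify_to_one_line_alt lines
instance (lines : List String) (out : List String) : Decidable (Spec_simplify_to_one_line lines out) := by unfold Spec_simplify_to_one_line; infer_instance

-- ===== CLAIM (what is proved, stated in full; the proofs are below) =====
def Claim_equal_simplify_to_one_line : Prop := ∀ (lines : List String), Dom_simplify_to_one_line lines → Spec_simplify_to_one_line lines (simplify_to_one_line lines)

-- ===== LEMMAS AND PROOFS =====

-- recursive characterisation of the grouping, used only in the proofs
def pvGroups : List String → List String
  | [] => [""]
  | l :: ls =>
    if pvLineEnd l then l :: pvGroups ls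
    else
      match pvGroups ls with
      | [] => [l]
      | h :: t => (l ++ h) :: t

theorem pvGroups_ne_nil (ls : List String) : pvGroups ls ≠ [] := by
  cases ls with
  | nil => simp [pvGroups]
  | cons l ls =>
    simp only [pvGroups]
    split
    · simp
    · split <;> simp

-- ''.join with empty separator peels one part off
theorem join_empty_cons (p : String) (ps : List String) :
    PySem.Str.join "" (p :: ps) = p ++ PySem.Str.join "" ps := by
  apply String.ext
  simp only [pysem, PySem.Chars.join, String.toList_append]
  cases ps with
  | nil => simp [List.intercalate]
  | cons q qs => simp [List.intercalate]

-- B's reversed fold computes pvGroups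
theorem alt_state (ls : List String) :
    PySem.Str.join "" (ls.reverse.foldl pvStepB ([], [])).1.reverse = (pvGroups ls).headI ∧
    (ls.reverse.foldl pvStepB ([], [])).2 = ((pvGroups ls).tail).reverse := by
  induction ls with
  | nil => constructor <;> rfl
  | cons l ls ih =>
    rw [List.reverse_cons, List.foldl_append, List.foldl_cons, List.foldl_nil]
    cases hg : pvGroups ls with
    | nil => exact absurd hg (pvGroups_ne_nil ls)
    | cons a t =>
      rw [hg] at ih
      cases hst : List.foldl pvStepB ([], []) ls.reverse with
      | mk P R =>
        rw [hst] at ih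
        obtain ⟨ih1, ih2⟩ := ih
        simp only [List.headI, List.tail_cons] at ih1 ih2
        by_cases h : pvLineEnd l = true
        · refine ⟨?_, ?_⟩
          · simp [pvStepB, pvGroups, h, join_empty_cons]
            rfl
          · simp [pvStepB, pvGroups, h, hg, ih1, ih2]
        · refine ⟨?_, ?_⟩
          · simp [pvStepB, pvGroups, h, hg, join_empty_cons, ih1]
          · simp [pvStepB, pvGroups, h, hg, ih2]

-- pending "" prepends nothing onto a nonempty group list
def pvPrep (cur : String) : List String → List String
  | [] => [cur]
  | h :: t => (cur ++ h) :: t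

theorem pvPrep_empty (g : List String) (hg : g ≠ []) : pvPrep "" g = g := by
  cases g with
  | nil => exact absurd rfl hg
  | cons h t => simp [pvPrep]

-- A's fold, generalised over accumulator and pending string
theorem a_fold (ls : List String) (acc : List String) (cur : String) :
    (ls.foldl pvStepA (acc, cur, false)).2.2 = false ∧
    (ls.foldl pvStepA (acc, cur, false)).1 ++ [(ls.foldl pvStepA (acc, cur, false)).2.1] =
      acc ++ pvPrep cur (pvGroups ls) := by
  induction ls generalizing acc cur with
  | nil => simp [pvPrep, pvGroups]
  | cons l ls ih =>
    rw [List.foldl_cons]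
    by_cases h : pvLineEnd l = true
    · rw [show pvStepA (acc, cur, false) l = (acc ++ [cur ++ l], "", false) by simp [pvStepA, h]]
      have := ih (acc ++ [cur ++ l]) ""
      refine ⟨this.1, ?_⟩
      rw [this.2, pvPrep_empty _ (pvGroups_ne_nil ls)]
      simp [pvGroups, h, pvPrep]
    · rw [show pvStepA (acc, cur, false) l = (acc, cur ++ l, false) by simp [pvStepA, h]]
      have := ih acc (cur ++ l)
      refine ⟨this.1, ?_⟩
      rw [this.2]
      cases hg : pvGroups ls with
      | nil => exact absurd hg (pvGroups_ne_nil ls)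
      | cons a t => simp [pvGroups, h, hg, pvPrep, String.append_assoc]

-- ===== VERDICT (by name: the statement is the Claim_ definition above) =====
theorem simplify_to_one_line_spec : Claim_equal_simplify_to_one_line := by
  intro lines _
  unfold Spec_simplify_to_one_line
  obtain ⟨hf, he⟩ := a_fold lines [] ""
  rw [List.nil_append, pvPrep_empty _ (pvGroups_ne_nil lines)] at he
  obtain ⟨hb1, hb2⟩ := alt_state lines
  simp only [simplify_to_one_line, simplify_to_one_line_alt, hf, Bool.not_false, if_true,
    hb1, hb2, List.reverse_reverse]
  rw [he]
  cases hg : pvGroups lines with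
  | nil => exact absurd hg (pvGroups_ne_nil lines)
  | cons a t => simp
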